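-- pv_equiv track=rewrite | github.com/VuDinhKhai/socket_server_client | client.py | decryptedText
-- ===== SOURCE A (Python) =====
-- def generateKey(len_str, key): # len_str = Độ dài key cần tạo(int), key(string) => return key được lặp lại (string)
--     key = list(key)
--     if len_str == len(key):
--         return(key)
--     else:
--         for i in range(len_str - len(key)):
--             key.append(key[i % len(key)])
--     return("" . join(key))
--
-- def decryptedText(cipher_text, key): # Giải mã text
--     decry_text = []
--     key = generateKey(len(cipher_text), key)
--     for i in range(len(cipher_text)):
--         x = (ord(cipher_text[i]) -
--              ord(key[i]) + 256) % 256
--         # x += ord('A')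
--         decry_text.append(chr(x))
--     return("" . join(decry_text))
-- ===== SOURCE B (Python) =====
-- def decryptedText(cipher_text, key):  # staged: peel off key-sized blocks, decrypt each by zipping with the key, join
--     parts = []
--     rest = cipher_text
--     while rest:
--         parts.append("".join(chr((ord(c) - ord(k) + 256) % 256) for c, k in zip(rest, key)))
--         rest = rest[len(key):]
--     return "".join(parts)
-- ===== Notes on version B (the rewrite author's own statement) =====
-- stated objective: alternative
-- what changed: Replaced the precomputed repeated-key table and per-index loop by a block decomposition: a while loop peels key-length blocks off the ciphertext, decrypts each block by zipping it with the (unrepeated) key, and joins the block results.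
import Mathlib
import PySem

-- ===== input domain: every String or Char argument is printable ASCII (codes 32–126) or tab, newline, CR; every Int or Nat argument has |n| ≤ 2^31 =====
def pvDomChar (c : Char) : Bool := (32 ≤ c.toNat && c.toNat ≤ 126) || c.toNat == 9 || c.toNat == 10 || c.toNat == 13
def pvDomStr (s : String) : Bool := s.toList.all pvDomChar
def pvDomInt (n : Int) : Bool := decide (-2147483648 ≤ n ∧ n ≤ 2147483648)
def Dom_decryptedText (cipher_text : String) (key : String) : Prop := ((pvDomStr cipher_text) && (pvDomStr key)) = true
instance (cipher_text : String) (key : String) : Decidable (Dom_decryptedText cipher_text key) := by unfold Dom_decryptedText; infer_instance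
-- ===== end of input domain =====

-- B replaces A's precomputed repeated-key table and index loop by a while loop that peels
-- key-sized blocks off the ciphertext and decrypts each block by zipping it with the key.

-- ===== PORT A =====
-- generateKey: build the repeated key by appending key[i % len(key)] to the growing list
def pvGenerateKey (len_str : Int) (key : String) : List Char :=
  let k := key.toList
  if len_str = (k.length : Int) then k
  else (PySem.List.pyRange 0 (len_str - (k.length : Int)) 1).foldl
        (fun acc i => acc ++ [PySem.List.pyGetD acc (PySem.Int.mod i (acc.length : Int)) ' ']) k

def decryptedText (cipher_text : String) (key : String) : String :=
  let cs := cipher_text.toList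
  let k := pvGenerateKey (cs.length : Int) key
  String.ofList ((PySem.List.pyRange 0 (cs.length : Int) 1).foldl
    (fun acc i => acc ++ [Char.ofNat (PySem.Int.mod
        (((PySem.List.pyGetD cs i ' ').toNat : Int)
          - ((PySem.List.pyGetD k i ' ').toNat : Int) + 256) 256).toNat]) [])

-- ===== PORT B =====
-- decrypt one block: zip the (remaining) ciphertext with the key, min-length truncation as zip does
def pvDecBlock (rest ks : List Char) : List Char :=
  (rest.zip ks).map (fun p => Char.ofNat (PySem.Int.mod
    ((p.1.toNat : Int) - (p.2.toNat : Int) + 256) 256).toNat)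

-- the while loop; fuel only makes the recursion total (|rest| shrinks by |key| ≥ 1 each turn
-- whenever the key is non-empty, so fuel = |cipher_text| is never exhausted inside Pre_)
def pvDecLoop (fuel : Nat) (rest ks : List Char) (parts : List (List Char)) : List (List Char) :=
  match fuel with
  | 0 => parts
  | fuel + 1 =>
    if rest = [] then parts
    else pvDecLoop fuel (PySem.List.slice rest (some (ks.length : Int)) none) ks
          (parts ++ [pvDecBlock rest ks])

def decryptedText_alt (cipher_text : String) (key : String) : String :=
  let cs := cipher_text.toList
  String.ofList (List.flatten (pvDecLoop cs.length cs key.toList []))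

-- ===== PRECONDITION & SPEC =====
-- Pre_ excludes exactly the inputs (non-empty cipher_text with empty key) on which A raises
-- ZeroDivisionError (key[i % len(key)] with len(key) == 0); B does not terminate there.
def Pre_decryptedText (cipher_text : String) (key : String) : Prop := key ≠ "" ∨ cipher_text = ""
instance (cipher_text : String) (key : String) : Decidable (Pre_decryptedText cipher_text key) := by unfold Pre_decryptedText; infer_instance
def pvWitness_decryptedText : String × String := ("hello", "ab")

def Spec_decryptedText (cipher_text : String) (key : String) (out : String) : Prop := out = decryptedText_alt cipher_text key
instance (cipher_text : String) (key : String) (out : String) : Decidable (Spec_decryptedText cipher_text key out) := by unfold Spec_decryptedText; infer_instance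

-- ===== CLAIM (what is proved, stated in full; the proofs are below) =====
def Claim_equal_decryptedText : Prop := ∀ (cipher_text : String) (key : String), Dom_decryptedText cipher_text key → Pre_decryptedText cipher_text key → Spec_decryptedText cipher_text key (decryptedText cipher_text key)

-- ===== LEMMAS AND PROOFS =====

-- the common reference value: position j of the decryption is dec(cs[j], ks[j % |ks|])
def pvDec (c k : Char) : Char :=
  Char.ofNat (PySem.Int.mod ((c.toNat : Int) - (k.toNat : Int) + 256) 256).toNat

def pvSpecList (cs ks : List Char) : List Char :=
  (List.range cs.length).map (fun j => pvDec (cs.getD j ' ') (ks.getD (j % ks.length) ' '))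

-- Invariant of generateKey's loop: after t appends the list has length len(key)+t and
-- position j holds key[j % len(key)].
theorem pv_gen_loop (ks : List Char) (h : ks ≠ []) (t : Nat) :
    (((PySem.List.pyRange 0 (t : Int) 1).foldl
        (fun acc i => acc ++ [PySem.List.pyGetD acc (PySem.Int.mod i (acc.length : Int)) ' ']) ks).length
        = ks.length + t)
    ∧ ∀ j, j < ks.length + t →
      ((PySem.List.pyRange 0 (t : Int) 1).foldl
        (fun acc i => acc ++ [PySem.List.pyGetD acc (PySem.Int.mod i (acc.length : Int)) ' ']) ks).getD j ' '
        = ks.getD (j % ks.length) ' ' := by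
  have hn0 : 0 < ks.length := List.length_pos_iff.mpr h
  induction t with
  | zero =>
      rw [show ((0 : Nat) : Int) = 0 from rfl, PySem.List.pyRange_one_eq_nil le_rfl]
      refine ⟨by simp, ?_⟩
      intro j hj
      simp only [List.foldl_nil]
      rw [Nat.mod_eq_of_lt (by omega)]
  | succ t ih =>
      obtain ⟨hlen, hget⟩ := ih
      have hsplit : PySem.List.pyRange 0 ((t + 1 : Nat) : Int) 1
          = PySem.List.pyRange 0 (t : Int) 1 ++ [(t : Int)] := by
        push_cast
        exact PySem.List.pyRange_one_succ_right (by positivity)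
      set L := (PySem.List.pyRange 0 (t : Int) 1).foldl
        (fun acc i => acc ++ [PySem.List.pyGetD acc (PySem.Int.mod i (acc.length : Int)) ' ']) ks with hL
      have hstep : (PySem.List.pyRange 0 ((t + 1 : Nat) : Int) 1).foldl
          (fun acc i => acc ++ [PySem.List.pyGetD acc (PySem.Int.mod i (acc.length : Int)) ' ']) ks
          = L ++ [PySem.List.pyGetD L (PySem.Int.mod (t : Int) (L.length : Int)) ' '] := by
        rw [hsplit, List.foldl_append]
        simp [hL]
      have hmod : PySem.Int.mod (t : Int) (L.length : Int) = (t : Int) := by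
        rw [PySem.Int.mod_natCast]
        have ht : t % L.length = t := Nat.mod_eq_of_lt (by omega)
        simp [ht]
      have hc : PySem.List.pyGetD L (PySem.Int.mod (t : Int) (L.length : Int)) ' '
          = ks.getD (t % ks.length) ' ' := by
        rw [hmod, PySem.List.pyGetD_natCast]
        exact hget t (by omega)
      rw [hstep, hc]
      constructor
      · simp [hlen]; omega
      · intro j hj
        by_cases hjl : j < ks.length + t
        · have : (L ++ [ks.getD (t % ks.length) ' ']).getD j ' ' = L.getD j ' ' := by
            simp only [List.getD, List.getElem?_append_left (by omega : j < L.length)]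
          rw [this]
          exact hget j hjl
        · have hjeq : j = ks.length + t := by omega
          have : (L ++ [ks.getD (t % ks.length) ' ']).getD j ' '
              = ks.getD (t % ks.length) ' ' := by
            subst hjeq
            simp only [List.getD, List.getElem?_append_right (by omega : L.length ≤ ks.length + t),
              hlen]
            simp
          rw [this, hjeq, Nat.add_mod_left]

-- The character generateKey provides at any position j < n is key[j % len(key)].
theorem pv_gen_char (key : String) (h : key.toList ≠ []) (n j : Nat) (hj : j < n) :
    (pvGenerateKey (n : Int) key).getD j ' '
      = key.toList.getD (j % key.toList.length) ' ' := by
  have hn0 : 0 < key.toList.length := List.length_pos_iff.mpr h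
  unfold pvGenerateKey
  simp only
  by_cases heq : (n : Int) = (key.toList.length : Int)
  · rw [if_pos heq]
    have : n = key.toList.length := by exact_mod_cast heq
    rw [Nat.mod_eq_of_lt (by omega)]
  · rw [if_neg heq]
    by_cases hle : n ≤ key.toList.length
    · have hnil : PySem.List.pyRange 0 ((n : Int) - (key.toList.length : Int)) 1 = [] :=
        PySem.List.pyRange_one_eq_nil (by omega)
      rw [hnil]
      simp only [List.foldl_nil]
      rw [Nat.mod_eq_of_lt (by omega)]
    · have hcast : ((n : Int) - (key.toList.length : Int)) = ((n - key.toList.length : Nat) : Int) := by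
        omega
      rw [hcast]
      have := pv_gen_loop key.toList h (n - key.toList.length)
      exact this.2 j (by omega)

-- A's list of output characters is pvSpecList.
theorem pv_A_eq_spec (ct key : String) (hk : key.toList ≠ []) :
    decryptedText ct key = String.ofList (pvSpecList ct.toList key.toList) := by
  have hn0 : 0 < key.toList.length := List.length_pos_iff.mpr hk
  unfold decryptedText pvSpecList
  simp only
  congr 1
  rw [PySem.List.foldl_append_singleton_eq_map, List.nil_append,
    PySem.List.pyRange_zero_nat, List.map_map]
  apply List.map_congr_left
  intro j hj
  rw [List.mem_range] at hj
  simp only [Function.comp]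
  rw [PySem.List.pyGetD_natCast, PySem.List.pyGetD_natCast,
    pv_gen_char key hk ct.toList.length j hj]
  rfl

-- one block of B, written index-wise (zip truncates at the shorter list)
theorem pv_block_eq (rest ks : List Char) :
    pvDecBlock rest ks
      = (List.range (min rest.length ks.length)).map
          (fun j => pvDec (rest.getD j ' ') (ks.getD j ' ')) := by
  unfold pvDecBlock
  apply List.ext_getElem
  · simp
  · intro j h1 h2
    simp only [List.getElem_map, List.getElem_zip, List.getElem_range]
    simp only [List.length_map, List.length_zip] at h1
    rw [List.getD_eq_getElem _ _ (by omega), List.getD_eq_getElem _ _ (by omega)]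
    rfl

-- peeling one key-sized block off the front of the reference value
theorem pv_spec_peel (rest ks : List Char) (hk : ks ≠ []) :
    pvSpecList rest ks
      = pvDecBlock rest ks ++ pvSpecList (rest.drop ks.length) ks := by
  have hn0 : 0 < ks.length := List.length_pos_iff.mpr hk
  rw [pv_block_eq]
  by_cases hle : rest.length ≤ ks.length
  · have hdrop : rest.drop ks.length = [] := List.drop_eq_nil_of_le hle
    rw [hdrop]
    unfold pvSpecList
    simp only [List.length_nil, List.range_zero, List.map_nil, List.append_nil,
      Nat.min_eq_left hle]
    apply List.map_congr_left
    intro j hj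
    rw [List.mem_range] at hj
    rw [Nat.mod_eq_of_lt (by omega)]
  · have hmin : min rest.length ks.length = ks.length := Nat.min_eq_right (by omega)
    unfold pvSpecList
    rw [hmin, List.length_drop,
      show rest.length = ks.length + (rest.length - ks.length) by omega,
      List.range_add, List.map_append, List.map_map]
    congr 1
    · apply List.map_congr_left
      intro j hj
      rw [List.mem_range] at hj
      rw [Nat.mod_eq_of_lt (by omega)]
    · rw [Nat.add_sub_cancel_left]
      apply List.map_congr_left
      intro j hj
      rw [List.mem_range] at hj
      simp only [Function.comp]
      rw [Nat.add_mod_left, List.getD_eq_getElem rest _ (by omega),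
        List.getD_eq_getElem (rest.drop ks.length) _ (by simp; omega),
        List.getElem_drop]

-- the while loop computes the reference value whenever fuel covers |rest| and the key is non-empty
theorem pv_loop_eq (ks : List Char) (hk : ks ≠ []) :
    ∀ (fuel : Nat) (rest : List Char) (parts : List (List Char)), rest.length ≤ fuel →
      List.flatten (pvDecLoop fuel rest ks parts)
        = List.flatten parts ++ pvSpecList rest ks := by
  have hn0 : 0 < ks.length := List.length_pos_iff.mpr hk
  intro fuel
  induction fuel with
  | zero =>
      intro rest parts hle
      have : rest = [] := List.eq_nil_of_length_eq_zero (by omega)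
      subst this
      simp [pvDecLoop, pvSpecList]
  | succ fuel ih =>
      intro rest parts hle
      unfold pvDecLoop
      by_cases hr : rest = []
      · subst hr
        simp [pvSpecList]
      · rw [if_neg hr, PySem.List.slice_from_natCast]
        have hrl : 0 < rest.length := List.length_pos_iff.mpr hr
        rw [ih (rest.drop ks.length) (parts ++ [pvDecBlock rest ks]) (by simp; omega)]
        rw [List.flatten_append, List.flatten_cons, List.flatten_nil, List.append_nil,
          List.append_assoc, ← pv_spec_peel rest ks hk]

theorem decryptedText_spec : Claim_equal_decryptedText := by
  intro ct key _ hpre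
  unfold Spec_decryptedText
  by_cases hk : key.toList = []
  · -- key = "" forces ct = "" by Pre_; both sides are ""
    have hkey : key = "" := by
      have := congrArg String.ofList hk
      simpa using this
    have hct : ct = "" := by
      rcases hpre with h | h
      · exact absurd hkey h
      · exact h
    subst hct
    simp [decryptedText, decryptedText_alt, pvGenerateKey, pvDecLoop,
      PySem.List.pyRange_one_eq_nil]
  · rw [pv_A_eq_spec ct key hk]
    unfold decryptedText_alt
    simp only
    rw [pv_loop_eq key.toList hk ct.toList.length ct.toList [] le_rfl]
    simp

-- ===== VERDICT (by name: the statement is the Claim_ definition above) =====
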